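-- pv_equiv track=rewrite | github.com/kimeisele/steward | steward/briefing_stages.py | _group_services
-- ===== SOURCE A (Python) =====
-- def _group_services(svc_names: list[str]) -> dict[str, list[str]]:
--     groups: dict[str, list[str]] = {
--         "Cognitive": [],
--         "Memory": [],
--         "Safety": [],
--         "Federation": [],
--         "Healing": [],
--         "Other": [],
--     }
--
--     cognitive = {"SVC_ATTENTION", "SVC_MAHA_LLM", "SVC_COMPRESSION", "SVC_ANTARANGA", "SVC_VENU", "SVC_SIKSASTAKAM"}
--     memory = {"SVC_MEMORY", "SVC_SYNAPSE_STORE", "SVC_CACHE", "SVC_KNOWLEDGE_GRAPH", "SVC_TASK_MANAGER"}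
--     safety = {"SVC_SAFETY_GUARD", "SVC_NARASIMHA", "SVC_INTEGRITY", "SVC_DIAMOND"}
--     federation = {
--         "SVC_FEDERATION",
--         "SVC_FEDERATION_TRANSPORT",
--         "SVC_FEDERATION_RELAY",
--         "SVC_GIT_NADI_SYNC",
--         "SVC_REAPER",
--         "SVC_MARKETPLACE",
--     }
--     healing = {"SVC_IMMUNE", "SVC_FEEDBACK", "SVC_OUROBOROS"}
--
--     for svc_name in svc_names:
--         if svc_name in cognitive:
--             groups["Cognitive"].append(svc_name)
--         elif svc_name in memory:
--             groups["Memory"].append(svc_name)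
--         elif svc_name in safety:
--             groups["Safety"].append(svc_name)
--         elif svc_name in federation:
--             groups["Federation"].append(svc_name)
--         elif svc_name in healing:
--             groups["Healing"].append(svc_name)
--         else:
--             groups["Other"].append(svc_name)
--
--     return {k: v for k, v in groups.items() if v}
-- ===== SOURCE B (Python) =====
-- # B: category-major staged passes — instead of a single item-major loop with a
-- # mutable groups dict, build each group's list directly with one filter pass per
-- # category, then drop the empty groups (alternative decomposition; not claimed faster).
--
--
-- def _group_services(svc_names: list[str]) -> dict[str, list[str]]:
--     cognitive = {"SVC_ATTENTION", "SVC_MAHA_LLM", "SVC_COMPRESSION", "SVC_ANTARANGA", "SVC_VENU", "SVC_SIKSASTAKAM"}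
--     memory = {"SVC_MEMORY", "SVC_SYNAPSE_STORE", "SVC_CACHE", "SVC_KNOWLEDGE_GRAPH", "SVC_TASK_MANAGER"}
--     safety = {"SVC_SAFETY_GUARD", "SVC_NARASIMHA", "SVC_INTEGRITY", "SVC_DIAMOND"}
--     federation = {
--         "SVC_FEDERATION",
--         "SVC_FEDERATION_TRANSPORT",
--         "SVC_FEDERATION_RELAY",
--         "SVC_GIT_NADI_SYNC",
--         "SVC_REAPER",
--         "SVC_MARKETPLACE",
--     }
--     healing = {"SVC_IMMUNE", "SVC_FEEDBACK", "SVC_OUROBOROS"}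
--     known = cognitive | memory | safety | federation | healing
--
--     buckets = [
--         ("Cognitive", [s for s in svc_names if s in cognitive]),
--         ("Memory", [s for s in svc_names if s in memory]),
--         ("Safety", [s for s in svc_names if s in safety]),
--         ("Federation", [s for s in svc_names if s in federation]),
--         ("Healing", [s for s in svc_names if s in healing]),
--         ("Other", [s for s in svc_names if s not in known]),
--     ]
--     return {k: v for k, v in buckets if v}
-- ===== Notes on version B (the rewrite author's own statement) =====
-- stated objective: alternative
-- what changed: A's single item-major loop dispatching each name through a five-way elif cascade into a mutable groups dict is replaced by category-major staged passes: one filter comprehension per category (Other = not in the union of the five sets), assembled directly into the ordered result, then empty groups dropped; correct because the category sets are pairwise disjoint.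
import Mathlib
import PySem

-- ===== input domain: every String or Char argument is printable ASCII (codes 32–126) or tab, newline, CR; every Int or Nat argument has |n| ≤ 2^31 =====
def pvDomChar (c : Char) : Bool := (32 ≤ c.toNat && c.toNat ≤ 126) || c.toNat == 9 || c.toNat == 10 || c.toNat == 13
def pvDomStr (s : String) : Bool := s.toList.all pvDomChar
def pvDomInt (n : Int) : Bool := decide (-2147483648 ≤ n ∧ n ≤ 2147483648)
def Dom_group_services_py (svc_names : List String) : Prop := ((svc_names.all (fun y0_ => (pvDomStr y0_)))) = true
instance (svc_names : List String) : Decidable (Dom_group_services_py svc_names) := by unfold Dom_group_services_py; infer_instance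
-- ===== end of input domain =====

-- B replaces A's single item-major loop over a mutable groups dict by category-major
-- staged filter passes, one per group (alternative decomposition; same cost).

-- ===== PORT A =====
def pvCognitive : PySem.Set String := PySem.Set.ofList ["SVC_ATTENTION", "SVC_MAHA_LLM", "SVC_COMPRESSION", "SVC_ANTARANGA", "SVC_VENU", "SVC_SIKSASTAKAM"]
def pvMemory : PySem.Set String := PySem.Set.ofList ["SVC_MEMORY", "SVC_SYNAPSE_STORE", "SVC_CACHE", "SVC_KNOWLEDGE_GRAPH", "SVC_TASK_MANAGER"]
def pvSafety : PySem.Set String := PySem.Set.ofList ["SVC_SAFETY_GUARD", "SVC_NARASIMHA", "SVC_INTEGRITY", "SVC_DIAMOND"]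
def pvFederation : PySem.Set String := PySem.Set.ofList ["SVC_FEDERATION", "SVC_FEDERATION_TRANSPORT", "SVC_FEDERATION_RELAY", "SVC_GIT_NADI_SYNC", "SVC_REAPER", "SVC_MARKETPLACE"]
def pvHealing : PySem.Set String := PySem.Set.ofList ["SVC_IMMUNE", "SVC_FEEDBACK", "SVC_OUROBOROS"]

def pvInitGroupsA : PySem.Dict String (List String) :=
  PySem.Dict.ofList [("Cognitive", []), ("Memory", []), ("Safety", []), ("Federation", []), ("Healing", []), ("Other", [])]

def group_services_py (svc_names : List String) : List (String × List String) :=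
  (svc_names.foldl (fun groups svc =>
      if pvCognitive.contains svc then groups.modify "Cognitive" [] (· ++ [svc])
      else if pvMemory.contains svc then groups.modify "Memory" [] (· ++ [svc])
      else if pvSafety.contains svc then groups.modify "Safety" [] (· ++ [svc])
      else if pvFederation.contains svc then groups.modify "Federation" [] (· ++ [svc])
      else if pvHealing.contains svc then groups.modify "Healing" [] (· ++ [svc])
      else groups.modify "Other" [] (· ++ [svc])) pvInitGroupsA).items.filter
    (fun kv => !kv.2.isEmpty)

-- ===== PORT B =====
def pvKnown : PySem.Set String :=
  PySem.Set.union (PySem.Set.union (PySem.Set.union (PySem.Set.union pvCognitive pvMemory) pvSafety) pvFederation) pvHealing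

def group_services_py_alt (svc_names : List String) : List (String × List String) :=
  ([("Cognitive", svc_names.filter (fun s => pvCognitive.contains s)),
    ("Memory", svc_names.filter (fun s => pvMemory.contains s)),
    ("Safety", svc_names.filter (fun s => pvSafety.contains s)),
    ("Federation", svc_names.filter (fun s => pvFederation.contains s)),
    ("Healing", svc_names.filter (fun s => pvHealing.contains s)),
    ("Other", svc_names.filter (fun s => !pvKnown.contains s))]).filter
    (fun kv => !kv.2.isEmpty)

-- ===== PRECONDITION & SPEC =====
def Spec_group_services_py (svc_names : List String) (out : List (String × List String)) : Prop := out = group_services_py_alt svc_names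
instance (svc_names : List String) (out : List (String × List String)) : Decidable (Spec_group_services_py svc_names out) := by unfold Spec_group_services_py; infer_instance

-- ===== CLAIM (what is proved, stated in full; the proofs are below) =====
def Claim_equal_group_services_py : Prop := ∀ (svc_names : List String), Dom_group_services_py svc_names → Spec_group_services_py svc_names (group_services_py svc_names)

-- ===== LEMMAS AND PROOFS =====

-- disjointness, pointwise: a name in a later category is in no earlier one,
-- so A's cascade predicate for each bucket collapses to plain membership
lemma pv_pt_mem (s : String) :
    (!pvCognitive.contains s && pvMemory.contains s) = pvMemory.contains s := by
  by_cases h : pvMemory.contains s = true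
  · simp [pvMemory, PySem.Set.ofList, PySem.Set.contains] at h
    rcases h with h|h|h|h|h <;> subst h <;> decide
  · simp at h; simp [h]

lemma pv_pt_saf (s : String) :
    (!pvCognitive.contains s && (!pvMemory.contains s && pvSafety.contains s)) = pvSafety.contains s := by
  by_cases h : pvSafety.contains s = true
  · simp [pvSafety, PySem.Set.ofList, PySem.Set.contains] at h
    rcases h with h|h|h|h <;> subst h <;> decide
  · simp at h; simp [h]

lemma pv_pt_fed (s : String) :
    (!pvCognitive.contains s && (!pvMemory.contains s && (!pvSafety.contains s && pvFederation.contains s))) = pvFederation.contains s := by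
  by_cases h : pvFederation.contains s = true
  · simp [pvFederation, PySem.Set.ofList, PySem.Set.contains] at h
    rcases h with h|h|h|h|h|h <;> subst h <;> decide
  · simp at h; simp [h]

lemma pv_pt_heal (s : String) :
    (!pvCognitive.contains s && (!pvMemory.contains s && (!pvSafety.contains s && (!pvFederation.contains s && pvHealing.contains s)))) = pvHealing.contains s := by
  by_cases h : pvHealing.contains s = true
  · simp [pvHealing, PySem.Set.ofList, PySem.Set.contains] at h
    rcases h with h|h|h <;> subst h <;> decide
  · simp at h; simp [h]

-- the five sets are pairwise disjoint and duplicate-free, so their union is the concatenation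
lemma pv_known_eq : pvKnown = pvCognitive ++ pvMemory ++ pvSafety ++ pvFederation ++ pvHealing := by decide

lemma pv_pt_other (s : String) :
    (!pvCognitive.contains s && (!pvMemory.contains s && (!pvSafety.contains s && (!pvFederation.contains s && !pvHealing.contains s)))) = !pvKnown.contains s := by
  have hk : pvKnown.contains s =
      (pvCognitive.contains s || pvMemory.contains s || pvSafety.contains s || pvFederation.contains s || pvHealing.contains s) := by
    rw [pv_known_eq]
    simp [PySem.Set.contains, Bool.or_assoc]
  rw [hk]
  cases pvCognitive.contains s <;> cases pvMemory.contains s <;> cases pvSafety.contains s <;>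
    cases pvFederation.contains s <;> cases pvHealing.contains s <;> rfl

-- A's fold, characterized: after the loop, each bucket holds the filter of the
-- cascade predicate for its category
lemma pv_foldA_eq (l : List String) :
    l.foldl (fun groups svc =>
      if pvCognitive.contains svc then groups.modify "Cognitive" [] (· ++ [svc])
      else if pvMemory.contains svc then groups.modify "Memory" [] (· ++ [svc])
      else if pvSafety.contains svc then groups.modify "Safety" [] (· ++ [svc])
      else if pvFederation.contains svc then groups.modify "Federation" [] (· ++ [svc])
      else if pvHealing.contains svc then groups.modify "Healing" [] (· ++ [svc])
      else groups.modify "Other" [] (· ++ [svc])) pvInitGroupsA =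
    PySem.Dict.mk
      [("Cognitive", l.filter (fun s => pvCognitive.contains s)),
       ("Memory", l.filter (fun s => !pvCognitive.contains s && pvMemory.contains s)),
       ("Safety", l.filter (fun s => !pvCognitive.contains s && (!pvMemory.contains s && pvSafety.contains s))),
       ("Federation", l.filter (fun s => !pvCognitive.contains s && (!pvMemory.contains s && (!pvSafety.contains s && pvFederation.contains s)))),
       ("Healing", l.filter (fun s => !pvCognitive.contains s && (!pvMemory.contains s && (!pvSafety.contains s && (!pvFederation.contains s && pvHealing.contains s))))),
       ("Other", l.filter (fun s => !pvCognitive.contains s && (!pvMemory.contains s && (!pvSafety.contains s && (!pvFederation.contains s && !pvHealing.contains s)))))] := by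
  induction l using List.reverseRecOn with
  | nil => rfl
  | append_singleton l x ih =>
      rw [List.foldl_append, ih]
      simp only [List.foldl_cons, List.foldl_nil, List.filter_append]
      by_cases h1 : pvCognitive.contains x <;>
        by_cases h2 : pvMemory.contains x <;>
        by_cases h3 : pvSafety.contains x <;>
        by_cases h4 : pvFederation.contains x <;>
        by_cases h5 : pvHealing.contains x <;>
          (simp only [h1, h2, h3, h4, h5, if_true];
           simp at h1 h2 h3 h4 h5;
           simp [List.filter, h1, h2, h3, h4, h5,
             PySem.Dict.modify, PySem.Dict.insert, PySem.Dict.get?, PySem.Dict.getD, PySem.Dict.contains])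

-- ===== VERDICT (by name: the statement is the Claim_ definition above) =====
theorem group_services_py_spec : Claim_equal_group_services_py := by
  intro svc_names _
  unfold Spec_group_services_py group_services_py group_services_py_alt
  rw [pv_foldA_eq]
  have hm := funext pv_pt_mem
  have hs := funext pv_pt_saf
  have hf := funext pv_pt_fed
  have hh := funext pv_pt_heal
  have ho := funext pv_pt_other
  simp only [hm, hs, hf, hh, ho]
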